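-- pv_equiv track=rewrite | github.com/akhiloruganti/Talent-Management-Assistant | PythonBackend/llm_service.py | _find_resource
-- ===== SOURCE A (Python) =====
-- from typing import Dict, List, Any, Optional, TypedDict, Tuple
--
-- def _find_resource(resources: List[Dict[str, Any]], name: str) -> Optional[Dict[str, Any]]:
--     q = name.lower().strip()
--     for r in resources:
--         if r.get("name", "").lower() == q:
--             return r
--     for r in resources:
--         if q in r.get("name", "").lower():
--             return r
--     return None
-- ===== SOURCE B (Python) =====
-- def _find_resource(resources, name):
--     q = name.lower().strip()
--     candidate = None
--     for r in resources:
--         n = r.get("name", "").lower()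
--         if n == q:
--             return r
--         if candidate is None and q in n:
--             candidate = r
--     return candidate
-- ===== Notes on version B (the rewrite author's own statement) =====
-- stated objective: alternative
-- what changed: B replaces A's two sequential scans (exact match, then substring match) by a single pass that returns on an exact hit and remembers the first substring candidate in a local variable.
import Mathlib
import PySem

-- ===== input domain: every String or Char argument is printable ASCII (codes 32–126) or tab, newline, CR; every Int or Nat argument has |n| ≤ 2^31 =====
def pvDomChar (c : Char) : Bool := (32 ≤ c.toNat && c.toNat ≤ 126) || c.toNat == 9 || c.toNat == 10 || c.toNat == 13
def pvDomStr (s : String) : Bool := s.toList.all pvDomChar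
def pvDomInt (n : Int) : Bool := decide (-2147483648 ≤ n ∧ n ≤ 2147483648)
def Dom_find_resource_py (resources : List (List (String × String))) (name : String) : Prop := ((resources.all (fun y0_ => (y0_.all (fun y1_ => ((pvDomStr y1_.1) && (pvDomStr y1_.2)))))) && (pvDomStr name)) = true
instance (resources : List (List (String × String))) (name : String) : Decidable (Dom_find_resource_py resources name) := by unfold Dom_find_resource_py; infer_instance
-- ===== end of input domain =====

-- B replaces A's two sequential scans by one pass that returns on an exact hit and
-- remembers the first substring candidate; return values proved equal on Dom.

-- ===== PORT A =====
-- r.get("name", "").lower()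
def pvNameLower (r : List (String × String)) : String :=
  PySem.Str.lower (PySem.Dict.getD (PySem.Dict.mk r) "name" "")

-- first loop of A: exact match
def pvFindExact (q : String) : List (List (String × String)) → Option (List (String × String))
  | [] => none
  | r :: rest => if pvNameLower r == q then some r else pvFindExact q rest

-- second loop of A: substring match
def pvFindSub (q : String) : List (List (String × String)) → Option (List (String × String))
  | [] => none
  | r :: rest => if PySem.Str.isIn q (pvNameLower r) then some r else pvFindSub q rest

def find_resource_py (resources : List (List (String × String))) (name : String) : Option (List (String × String)) :=
  let q := PySem.Str.strip (PySem.Str.lower name)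
  match pvFindExact q resources with
  | some r => some r
  | none => pvFindSub q resources

-- ===== PORT B =====
-- single pass with a 'candidate' accumulator (Source B's loop)
def pvLoopB (q : String) : List (List (String × String)) → Option (List (String × String)) → Option (List (String × String))
  | [], cand => cand
  | r :: rest, cand =>
    let n := PySem.Str.lower (PySem.Dict.getD (PySem.Dict.mk r) "name" "")
    if n == q then some r
    else pvLoopB q rest (if cand.isNone && PySem.Str.isIn q n then some r else cand)

def find_resource_py_alt (resources : List (List (String × String))) (name : String) : Option (List (String × String)) :=
  let q := PySem.Str.strip (PySem.Str.lower name)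
  pvLoopB q resources none

-- ===== PRECONDITION & SPEC =====
def Spec_find_resource_py (resources : List (List (String × String))) (name : String) (out : Option (List (String × String))) : Prop := out = find_resource_py_alt resources name
instance (resources : List (List (String × String))) (name : String) (out : Option (List (String × String))) : Decidable (Spec_find_resource_py resources name out) := by unfold Spec_find_resource_py; infer_instance

-- ===== CLAIM (what is proved, stated in full; the proofs are below) =====
def Claim_equal_find_resource_py : Prop := ∀ (resources : List (List (String × String))) (name : String), Dom_find_resource_py resources name → Spec_find_resource_py resources name (find_resource_py resources name)

-- ===== LEMMAS AND PROOFS =====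

-- ===== VERDICT (by name: the statement is the Claim_ definition above) =====
-- loop invariant: B's single pass equals A's two passes, threaded through the candidate
theorem pvLoopB_eq (q : String) (rs : List (List (String × String)))
    (cand : Option (List (String × String))) :
    pvLoopB q rs cand =
      (match pvFindExact q rs with
       | some r => some r
       | none => match cand with
         | some c => some c
         | none => pvFindSub q rs) := by
  induction rs generalizing cand with
  | nil => cases cand <;> simp [pvLoopB, pvFindExact, pvFindSub]
  | cons r rest ih =>
    simp only [pvLoopB, pvFindExact, pvFindSub, pvNameLower]
    by_cases he : PySem.Str.lower (PySem.Dict.getD (PySem.Dict.mk r) "name" "") == q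
    · simp [he]
    · simp only [he, ih]
      cases cand with
      | some c => simp
      | none =>
        by_cases hs : PySem.Chars.isIn q.toList (PySem.Chars.lower ((PySem.Dict.mk r).getD "name" "").toList) = true
        · simp [PySem.Str.isIn, hs]
        · simp [PySem.Str.isIn, hs]

theorem find_resource_py_spec : Claim_equal_find_resource_py := by
  intro resources name _
  unfold Spec_find_resource_py find_resource_py find_resource_py_alt
  rw [pvLoopB_eq]
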